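-- pv_equiv track=rewrite | github.com/A4Bio/RFold | colab_utils.py | visual_get_bases
-- ===== SOURCE A (Python) =====
-- def visual_get_bases(seq):
--     a_bases, u_bases, c_bases, g_bases = [], [], [], []
--     for ii, s in enumerate(seq):
--         if s == 'A': a_bases.append(ii+1)
--         if s == 'U': u_bases.append(ii+1)
--         if s == 'C': c_bases.append(ii+1)
--         if s == 'G': g_bases.append(ii+1)
--     a_bases = ''.join([str(s)+',' for s in a_bases])[:-1]
--     u_bases = ''.join([str(s)+',' for s in u_bases])[:-1]
--     c_bases = ''.join([str(s)+',' for s in c_bases])[:-1]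
--     g_bases = ''.join([str(s)+',' for s in g_bases])[:-1]
--     return a_bases, u_bases, c_bases, g_bases
-- ===== SOURCE B (Python) =====
-- def visual_get_bases(seq):
--     def idxs(base):
--         return ','.join(str(i + 1) for i, s in enumerate(seq) if s == base)
--     return idxs('A'), idxs('U'), idxs('C'), idxs('G')
-- ===== Notes on version B (the rewrite author's own statement) =====
-- stated objective: idiomatic
-- what changed: The single loop accumulating four index lists plus the join-then-drop-trailing-separator formatting is replaced by four independent per-base filtered comprehensions, each producing its comma-joined string directly with no intermediate index lists.
import Mathlib
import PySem

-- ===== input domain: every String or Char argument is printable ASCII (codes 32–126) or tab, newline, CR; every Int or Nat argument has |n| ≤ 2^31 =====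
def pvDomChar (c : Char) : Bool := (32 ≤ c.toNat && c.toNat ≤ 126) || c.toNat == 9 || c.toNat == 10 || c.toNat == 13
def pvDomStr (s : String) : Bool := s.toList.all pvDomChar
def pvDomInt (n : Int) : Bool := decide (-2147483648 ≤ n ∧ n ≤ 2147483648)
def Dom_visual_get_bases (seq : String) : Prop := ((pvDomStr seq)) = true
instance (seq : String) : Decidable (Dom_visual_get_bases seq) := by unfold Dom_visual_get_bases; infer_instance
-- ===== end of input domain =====

-- B replaces A's single four-accumulator loop and join-then-slice formatting by four
-- independent per-base filtered comprehensions joined with ','  (objective: idiomatic).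

-- ===== PORT A =====
-- the enumerate loop: counter ii, 4-tuple accumulator, append on each matching branch
def pvLoopA : List Char → Int → (List Int × List Int × List Int × List Int) →
    (List Int × List Int × List Int × List Int)
  | [], _, acc => acc
  | s :: rest, ii, (a, u, c, g) =>
      pvLoopA rest (ii + 1)
        ((if s == 'A' then a ++ [ii + 1] else a),
         (if s == 'U' then u ++ [ii + 1] else u),
         (if s == 'C' then c ++ [ii + 1] else c),
         (if s == 'G' then g ++ [ii + 1] else g))

-- ''.join([str(s)+',' for s in bs])[:-1]    ([:-1] on a list of chars is dropLast — exact)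
def pvFmtA (bs : List Int) : String :=
  String.ofList (((bs.map (fun s => PySem.Int.toChars s ++ [','])).flatten).dropLast)

def visual_get_bases (seq : String) : String × String × String × String :=
  let r := pvLoopA seq.toList 0 ([], [], [], [])
  (pvFmtA r.1, pvFmtA r.2.1, pvFmtA r.2.2.1, pvFmtA r.2.2.2)

-- ===== PORT B =====
-- generator: str(i+1) for i, s in enumerate(seq) if s == base
def pvIdxs : List Char → Int → Char → List (List Char)
  | [], _, _ => []
  | s :: rest, ii, base =>
      if s == base then PySem.Int.toChars (ii + 1) :: pvIdxs rest (ii + 1) base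
      else pvIdxs rest (ii + 1) base

-- ','.join(...) over one base
def pvJoinIdxs (seq : String) (base : Char) : String :=
  String.ofList (PySem.Chars.join [','] (pvIdxs seq.toList 0 base))

def visual_get_bases_alt (seq : String) : String × String × String × String :=
  (pvJoinIdxs seq 'A', pvJoinIdxs seq 'U', pvJoinIdxs seq 'C', pvJoinIdxs seq 'G')

-- ===== PRECONDITION & SPEC =====
def Spec_visual_get_bases (seq : String) (out : String × String × String × String) : Prop := out = visual_get_bases_alt seq
instance (seq : String) (out : String × String × String × String) : Decidable (Spec_visual_get_bases seq out) := by unfold Spec_visual_get_bases; infer_instance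

-- ===== CLAIM (what is proved, stated in full; the proofs are below) =====
def Claim_equal_visual_get_bases : Prop := ∀ (seq : String), Dom_visual_get_bases seq → Spec_visual_get_bases seq (visual_get_bases seq)

-- ===== LEMMAS AND PROOFS =====

-- the 1-based indices of base `b` in `xs`, starting the counter at `ii`
def pvSel (b : Char) : List Char → Int → List Int
  | [], _ => []
  | s :: rest, ii => if s == b then (ii + 1) :: pvSel b rest (ii + 1) else pvSel b rest (ii + 1)

lemma pvLoopA_eq (xs : List Char) : ∀ (ii : Int) (a u c g : List Int),
    pvLoopA xs ii (a, u, c, g) =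
      (a ++ pvSel 'A' xs ii, u ++ pvSel 'U' xs ii, c ++ pvSel 'C' xs ii, g ++ pvSel 'G' xs ii) := by
  induction xs with
  | nil => intro ii a u c g; simp [pvLoopA, pvSel]
  | cons s rest ih =>
      intro ii a u c g
      simp only [pvLoopA, pvSel, ih]
      split_ifs <;> simp

lemma pvIdxs_eq (xs : List Char) : ∀ (ii : Int) (b : Char),
    pvIdxs xs ii b = (pvSel b xs ii).map PySem.Int.toChars := by
  induction xs with
  | nil => intro ii b; simp [pvIdxs, pvSel]
  | cons s rest ih =>
      intro ii b
      simp only [pvIdxs, pvSel, ih]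
      split_ifs <;> simp

lemma pvFlatten_comma (b : Int) (bs : List Int) :
    ((b :: bs).map (fun s => PySem.Int.toChars s ++ [','])).flatten =
      PySem.Chars.join [','] ((b :: bs).map PySem.Int.toChars) ++ [','] := by
  induction bs generalizing b with
  | nil => simp [PySem.Chars.join_singleton]
  | cons b2 rest ih =>
      rw [List.map_cons, List.flatten_cons, ih b2]
      simp only [List.map_cons, PySem.Chars.join_cons_cons]
      simp

lemma pvFmtA_eq (bs : List Int) :
    pvFmtA bs = String.ofList (PySem.Chars.join [','] (bs.map PySem.Int.toChars)) := by
  cases bs with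
  | nil => simp [pvFmtA, PySem.Chars.join_nil]
  | cons b rest => rw [pvFmtA, pvFlatten_comma b rest, List.dropLast_concat]

-- ===== VERDICT (by name: the statement is the Claim_ definition above) =====
theorem visual_get_bases_spec : Claim_equal_visual_get_bases := by
  intro seq _
  unfold Spec_visual_get_bases visual_get_bases visual_get_bases_alt pvJoinIdxs
  rw [pvLoopA_eq]
  simp [pvFmtA_eq, pvIdxs_eq]
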